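-- pv_equiv track=rewrite | github.com/arv1983/Python-estruturas-de-repeticao | index.py | remove_more_than_two_repetitions
-- ===== SOURCE A (Python) =====
-- def remove_more_than_two_repetitions(text):
--     res = []
--     res[:] = text
--     retorno = []
--
--     for i in range(len(res)):
--         if len(retorno) < 2:
--             retorno.append(res[i])
--         else:
--             if retorno[len(retorno) -1] != res[i] or retorno[len(retorno) -2] != res[i]:
--                 retorno.append(res[i])
--
--     return ''.join(retorno)
-- ===== SOURCE B (Python) =====
-- def remove_more_than_two_repetitions(text):
--     # Run-based two-pointer scan: find each maximal run, keep at most two of it.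
--     out = []
--     i = 0
--     n = len(text)
--     while i < n:
--         c = text[i]
--         j = i + 1
--         while j < n and text[j] == c:
--             j += 1
--         out.append(text[i:min(j, i + 2)])
--         i = j
--     return ''.join(out)
-- ===== Notes on version B (the rewrite author's own statement) =====
-- stated objective: idiomatic
-- what changed: B replaces A's fold that re-inspects the last two elements of the growing output at every character by a two-pointer scan over maximal runs, appending at most the first two characters of each run.
import Mathlib
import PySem

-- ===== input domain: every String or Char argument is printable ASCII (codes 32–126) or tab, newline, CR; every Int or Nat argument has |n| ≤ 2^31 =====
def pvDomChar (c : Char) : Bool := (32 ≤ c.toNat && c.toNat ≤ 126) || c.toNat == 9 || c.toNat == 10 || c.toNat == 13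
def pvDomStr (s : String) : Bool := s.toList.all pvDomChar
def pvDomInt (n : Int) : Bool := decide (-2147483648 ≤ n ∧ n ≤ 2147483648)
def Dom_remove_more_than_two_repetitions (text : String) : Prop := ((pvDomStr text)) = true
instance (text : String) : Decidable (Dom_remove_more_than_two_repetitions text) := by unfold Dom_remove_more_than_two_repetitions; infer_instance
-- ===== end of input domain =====

-- B replaces A's fold that re-inspects the last two output elements per character
-- by a two-pointer scan over maximal runs keeping at most two of each (objective: idiomatic).

-- ===== PORT A =====
-- one iteration of A's for-loop body: retorno-append logic
def pvAStep (retorno : List Char) (c : Char) : List Char :=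
  if retorno.length < 2 then retorno ++ [c]
  else if PySem.List.pyGet? retorno ((retorno.length : Int) - 1) ≠ some c ∨
          PySem.List.pyGet? retorno ((retorno.length : Int) - 2) ≠ some c then
    retorno ++ [c]
  else retorno

def remove_more_than_two_repetitions (text : String) : String :=
  -- res[:] = text makes res the list of characters; the for-loop over range(len(res))
  -- reading res[i] is the left fold of the body over that character list
  let res := text.toList
  let retorno := res.foldl pvAStep []
  String.mk retorno

-- ===== PORT B =====
-- the outer while loop of Source B: take each maximal run (inner while = takeWhile),
-- append its first at-most-two characters (the slice text[i:min(j,i+2)] = take 2 of the run)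
def pvBGo : List Char → List Char
  | [] => []
  | c :: rest =>
    (c :: rest.takeWhile (· == c)).take 2 ++ pvBGo (rest.dropWhile (· == c))
termination_by l => l.length
decreasing_by
  have := List.length_dropWhile_le (p := (· == c)) (l := rest)
  simp only [List.length_cons]
  omega

def remove_more_than_two_repetitions_alt (text : String) : String :=
  String.mk (pvBGo text.toList)

-- ===== PRECONDITION & SPEC =====
def Spec_remove_more_than_two_repetitions (text : String) (out : String) : Prop := out = remove_more_than_two_repetitions_alt text
instance (text : String) (out : String) : Decidable (Spec_remove_more_than_two_repetitions text out) := by unfold Spec_remove_more_than_two_repetitions; infer_instance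

-- ===== CLAIM (what is proved, stated in full; the proofs are below) =====
def Claim_equal_remove_more_than_two_repetitions : Prop := ∀ (text : String), Dom_remove_more_than_two_repetitions text → Spec_remove_more_than_two_repetitions text (remove_more_than_two_repetitions text)

-- ===== LEMMAS AND PROOFS =====

lemma pvAStep_eq (acc : List Char) (c : Char) :
    pvAStep acc c =
      if 2 ≤ acc.length ∧ acc.getLast? = some c ∧ acc.dropLast.getLast? = some c then acc
      else acc ++ [c] := by
  unfold pvAStep
  by_cases h2 : acc.length < 2
  · simp [h2]
  · push_neg at h2
    have h1 : ((acc.length : Int) - 1) = ((acc.length - 1 : Nat) : Int) := by omega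
    have h1' : ((acc.length : Int) - 2) = ((acc.length - 2 : Nat) : Int) := by omega
    rw [if_neg (by omega), h1, h1', PySem.List.pyGet?_natCast, PySem.List.pyGet?_natCast]
    have e1 : acc[acc.length - 1]? = acc.getLast? := List.getLast?_eq_getElem?.symm
    have e2 : acc[acc.length - 2]? = acc.dropLast.getLast? := by
      rw [List.getLast?_eq_getElem?, List.getElem?_dropLast, List.length_dropLast]
      rw [if_pos (by omega), show acc.length - 1 - 1 = acc.length - 2 from by omega]
    rw [e1, e2]
    by_cases hl : acc.getLast? = some c <;> by_cases hl2 : acc.dropLast.getLast? = some c <;>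
      simp [hl, hl2, h2]

lemma head?_dropWhile_false (p : Char → Bool) (l : List Char) (x : Char)
    (h : (l.dropWhile p).head? = some x) : p x = false := by
  induction l with
  | nil => simp at h
  | cons a t ih =>
    rw [List.dropWhile_cons] at h
    split at h
    · exact ih h
    · simp_all

lemma takeWhile_eq_replicate (c : Char) (l : List Char) :
    l.takeWhile (· == c) = List.replicate (l.takeWhile (· == c)).length c := by
  apply List.eq_replicate_of_mem
  intro b hb
  have := List.mem_takeWhile_imp hb
  simpa using this

lemma pvA_stuck (m : Nat) (c : Char) (acc : List Char)
    (h2 : 2 ≤ acc.length) (hl : acc.getLast? = some c) (hl2 : acc.dropLast.getLast? = some c) :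
    (List.replicate m c).foldl pvAStep acc = acc := by
  induction m with
  | zero => rfl
  | succ n ih =>
    rw [List.replicate_succ, List.foldl_cons, pvAStep_eq, if_pos ⟨h2, hl, hl2⟩, ih]

lemma pvA_run (k : Nat) (c : Char) (acc : List Char) (h : acc.getLast? ≠ some c) :
    (List.replicate k c).foldl pvAStep acc = acc ++ List.replicate (min k 2) c := by
  match k with
  | 0 => simp
  | 1 =>
    have : pvAStep acc c = acc ++ [c] := by
      rw [pvAStep_eq, if_neg (by rintro ⟨-, hc, -⟩; exact h hc)]
    simp [this]
  | (n+2) =>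
    have s1 : pvAStep acc c = acc ++ [c] := by
      rw [pvAStep_eq, if_neg (by rintro ⟨-, hc, -⟩; exact h hc)]
    have s2 : pvAStep (acc ++ [c]) c = acc ++ [c] ++ [c] := by
      rw [pvAStep_eq, if_neg]
      rintro ⟨-, -, hc2⟩
      rw [List.dropLast_concat] at hc2
      exact h hc2
    rw [List.replicate_succ, List.replicate_succ, List.foldl_cons, List.foldl_cons, s1, s2,
      pvA_stuck n c _ (by simp) (List.getLast?_concat ..)
        (by rw [List.dropLast_concat]; exact List.getLast?_concat ..)]
    have : min (n+2) 2 = 2 := by omega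
    simp [List.replicate_succ]

lemma pvA_eq_pvB (l : List Char) (acc : List Char)
    (h : ∀ c, l.head? = some c → acc.getLast? ≠ some c) :
    l.foldl pvAStep acc = acc ++ pvBGo l := by
  induction l using pvBGo.induct generalizing acc with
  | case1 => simp [pvBGo]
  | case2 c rest ih =>
    have hacc : acc.getLast? ≠ some c := h c rfl
    have htw := takeWhile_eq_replicate c rest
    set tl := (rest.takeWhile (· == c)).length with htl
    have hsplit : c :: rest = List.replicate (tl + 1) c ++ rest.dropWhile (· == c) := by
      rw [List.replicate_succ, List.cons_append]
      congr 1
      rw [← htw, List.takeWhile_append_dropWhile]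
    have hmin1 : 1 ≤ min (tl + 1) 2 := by omega
    have hnew : (acc ++ List.replicate (min (tl + 1) 2) c).getLast? = some c := by
      obtain ⟨m, hm⟩ : ∃ m, min (tl + 1) 2 = m + 1 := ⟨min (tl + 1) 2 - 1, by omega⟩
      rw [hm, List.replicate_succ', ← List.append_assoc]
      exact List.getLast?_concat ..
    have hBGo : pvBGo (c :: rest) = List.replicate (min (tl + 1) 2) c ++ pvBGo (rest.dropWhile (· == c)) := by
      rw [pvBGo]
      congr 1
      rw [htw]
      rw [show (c :: List.replicate tl c) = List.replicate (tl + 1) c from (List.replicate_succ ..).symm,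
        List.take_replicate, Nat.min_comm]
    conv_lhs => rw [hsplit]
    rw [List.foldl_append, pvA_run _ _ _ hacc,
      ih _ (by
        intro d hd hlast
        have hy := head?_dropWhile_false (· == c) rest d hd
        have hdc : c = d := by simpa using hnew.symm.trans hlast
        simp [← hdc] at hy), hBGo, List.append_assoc]

-- ===== VERDICT (by name: the statement is the Claim_ definition above) =====
theorem remove_more_than_two_repetitions_spec : Claim_equal_remove_more_than_two_repetitions := by
  intro text _
  unfold Spec_remove_more_than_two_repetitions remove_more_than_two_repetitions remove_more_than_two_repetitions_alt
  simp [pvA_eq_pvB text.toList [] (by simp)]
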